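-- pv_equiv track=rewrite | github.com/Rodann/CIAOD | kurs_work/STROKI.py | find
-- ===== SOURCE A (Python) =====
-- def find(s,current):
--     l = 0
--     last = current - 1
--     pol = ''
--     while (last != -1) and (current != len(s)):
--         if s[last] == s[current]:
--             pol = s[last] + pol + s[current]
--             l += 1
--         else:
--             return l,pol
--         last -= 1
--         current +=1
--     return l,pol
-- ===== SOURCE B (Python) =====
-- def find(s, current):
--     # Pair up the reversed prefix with the suffix, count the matching prefix of
--     # pairs, and take the palindrome as one slice.
--     l = 0
--     for a, b in zip(reversed(s[:current]), s[current:]):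
--         if a != b:
--             break
--         l += 1
--     return l, s[current - l:current + l]
-- ===== Notes on version B (the rewrite author's own statement) =====
-- stated objective: faster
-- what changed: B has no index bookkeeping at all: it zips the reversed prefix s[:current] with the suffix s[current:], counts the matching prefix of pairs, and emits the palindrome as the single slice s[current-l:current+l], instead of A's while-loop over two moving indices with char-by-char string concatenation and an early return.
-- outside the precondition, e.g. on find('xyaa', -1): A returns (1, 'aa'), B returns (1, ''); on find('ab', 5): A raises IndexError, B returns (0, '')
import Mathlib
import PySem

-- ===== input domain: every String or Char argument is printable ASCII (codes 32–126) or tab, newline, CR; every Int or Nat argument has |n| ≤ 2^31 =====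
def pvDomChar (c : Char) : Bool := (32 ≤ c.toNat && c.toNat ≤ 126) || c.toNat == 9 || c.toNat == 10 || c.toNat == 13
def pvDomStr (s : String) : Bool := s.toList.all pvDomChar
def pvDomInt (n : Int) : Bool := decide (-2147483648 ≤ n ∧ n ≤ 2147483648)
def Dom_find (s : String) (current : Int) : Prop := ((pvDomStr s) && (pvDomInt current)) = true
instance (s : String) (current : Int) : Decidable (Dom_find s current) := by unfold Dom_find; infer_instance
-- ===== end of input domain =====

-- B zips the reversed prefix with the suffix, counts the matching prefix of pairs, and emits the
-- palindrome as one slice, instead of A's two-index while-loop with char-by-char concatenation (objective: faster — A's repeated concatenation is quadratic in the match length).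

-- ===== PORT A =====
def findLoop (cs : List Char) : Nat → Int → Int → Int → List Char → Int × List Char
  | 0, l, _, _, pol => (l, pol)
  | fuel + 1, l, last, current, pol =>
    if last ≠ -1 ∧ current ≠ (cs.length : Int) then
      match PySem.List.pyGet? cs last, PySem.List.pyGet? cs current with
      | some a, some b =>
        if a = b then findLoop cs fuel (l + 1) (last - 1) (current + 1) (a :: (pol ++ [b]))
        else (l, pol)
      | _, _ => (l, pol)  -- IndexError in Python; outside Pre_find
    else (l, pol)

def find (s : String) (current : Int) : Int × String :=
  let cs := s.toList
  let r := findLoop cs (cs.length + 1) 0 (current - 1) current []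
  (r.1, String.ofList r.2)

-- ===== PORT B =====
-- length (as an Int) of the longest matching prefix of a pair list ('for a, b in zip(...): if a != b: break; l += 1')
def countMatch : List (Char × Char) → Int
  | [] => 0
  | (a, b) :: rest => if a ≠ b then 0 else countMatch rest + 1

def find_alt (s : String) (current : Int) : Int × String :=
  let cs := s.toList
  let pairs := List.zip (PySem.List.slice cs none (some current)).reverse (PySem.List.slice cs (some current) none)
  let l := countMatch pairs
  (l, String.ofList (PySem.List.slice cs (some (current - l)) (some (current + l))))

-- ===== PRECONDITION & SPEC =====
-- Pre_ excludes current > len(s) and current ≤ -len(s), where A raises IndexError at once, and negative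
-- in-range current whose first character pair matches: there A expands through Python's negative-index
-- wraparound and either raises IndexError or returns a wraparound-built string (which of the two depends
-- on the string's contents, so it is not separable in closed form); B returns a prefix/suffix answer there.
def Pre_find (s : String) (current : Int) : Prop :=
  (0 ≤ current ∧ current ≤ (s.toList.length : Int)) ∨
  (-(s.toList.length : Int) < current ∧ current < 0 ∧
    PySem.List.pyGet? s.toList (current - 1) ≠ PySem.List.pyGet? s.toList current)
instance (s : String) (current : Int) : Decidable (Pre_find s current) := by unfold Pre_find; infer_instance
def pvWitness_find : String × Int := ("abba", 2)
def Spec_find (s : String) (current : Int) (out : Int × String) : Prop := out = find_alt s current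
instance (s : String) (current : Int) (out : Int × String) : Decidable (Spec_find s current out) := by unfold Spec_find; infer_instance

-- ===== CLAIM (what is proved, stated in full; the proofs are below) =====
def Claim_equal_find : Prop := ∀ (s : String) (current : Int), Dom_find s current → Pre_find s current → Spec_find s current (find s current)

-- ===== LEMMAS AND PROOFS =====

-- B's count, parametrised the way A's loop sees it
def mB (cs : List Char) (last current : Int) : Int :=
  countMatch (List.zip ((cs.take (last + 1).toNat).reverse) (cs.drop current.toNat))

lemma take_succ_reverse (cs : List Char) (k : Nat) (h : k < cs.length) :
    (cs.take (k + 1)).reverse = cs[k] :: (cs.take k).reverse := by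
  rw [List.take_add_one, List.getElem?_eq_getElem h]
  simp

lemma slice_extend (cs : List Char) (a b : Nat) (hab : a < b) (hb : b < cs.length) :
    (cs.drop a).take (b + 1 - a) = cs[a] :: (((cs.drop (a + 1)).take (b - (a + 1))) ++ [cs[b]]) := by
  have h1 : cs.drop a = cs[a] :: cs.drop (a + 1) := List.drop_eq_getElem_cons (by omega)
  have h2 : b + 1 - a = (b - (a + 1)) + 1 + 1 := by omega
  rw [h1, h2, List.take_succ_cons, List.take_add_one]
  have h3 : (cs.drop (a + 1))[b - (a + 1)]? = some cs[b] := by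
    rw [List.getElem?_drop]
    have h4 : a + 1 + (b - (a + 1)) = b := by omega
    rw [h4, List.getElem?_eq_getElem hb]
  rw [h3]
  rfl

lemma slice_self_nil (cs : List Char) (c : Int) :
    PySem.List.slice cs (some c) (some c) = [] := by
  have h := PySem.List.length_slice cs c c
  have h2 : (PySem.List.slice cs (some c) (some c)).length = 0 := by omega
  exact List.eq_nil_of_length_eq_zero h2

lemma loop_eq (cs : List Char) : ∀ (fuel : Nat) (l last current : Int) (pol : List Char),
    -1 ≤ last → last < current → current ≤ (cs.length : Int) →
    pol = PySem.List.slice cs (some (last + 1)) (some current) →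
    (cs.length : Int) - current < (fuel : Int) →
    findLoop cs fuel l last current pol =
      (l + mB cs last current,
       PySem.List.slice cs (some (last + 1 - mB cs last current)) (some (current + mB cs last current))) := by
  intro fuel
  induction fuel with
  | zero =>
    intro l last current pol _ _ hcur _ hfuel
    exact absurd hfuel (by push_cast; omega)
  | succ fuel ih =>
    intro l last current pol hlastge hlc hcur hpol hfuel
    have hcur0 : 0 ≤ current := by omega
    by_cases hg : 0 ≤ last ∧ current < (cs.length : Int)
    · have hlast0 : 0 ≤ last := hg.1
      have hlastlt : last.toNat < cs.length := by omega
      have hcurlt : current.toNat < cs.length := by omega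
      have ha : PySem.List.pyGet? cs last = some cs[last.toNat] :=
        PySem.List.pyGet?_eq_some_getElem cs hlast0 (by omega)
      have hb : PySem.List.pyGet? cs current = some cs[current.toNat] :=
        PySem.List.pyGet?_eq_some_getElem cs hcur0 (by omega)
      have hAguard : last ≠ -1 ∧ current ≠ (cs.length : Int) := ⟨by omega, by omega⟩
      have et : (last + 1).toNat = last.toNat + 1 := by omega
      have hmB : mB cs last current =
          if cs[last.toNat] ≠ cs[current.toNat] then 0 else mB cs (last - 1) (current + 1) + 1 := by
        unfold mB
        rw [et, take_succ_reverse cs last.toNat hlastlt,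
            List.drop_eq_getElem_cons hcurlt, List.zip_cons_cons]
        have e1 : (last - 1 + 1).toNat = last.toNat := by omega
        have e2 : (current + 1).toNat = current.toNat + 1 := by omega
        rw [show countMatch ((cs[last.toNat], cs[current.toNat]) ::
              List.zip (cs.take last.toNat).reverse (cs.drop (current.toNat + 1))) =
            if cs[last.toNat] ≠ cs[current.toNat] then 0 else
              countMatch (List.zip (cs.take last.toNat).reverse (cs.drop (current.toNat + 1))) + 1
          from rfl, e1, e2]
      by_cases heq : cs[last.toNat] = cs[current.toNat]
      · -- match: A steps; B's count is one more than the count of the inner state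
        have hstepA : findLoop cs (fuel + 1) l last current pol
            = findLoop cs fuel (l + 1) (last - 1) (current + 1) (cs[last.toNat] :: (pol ++ [cs[current.toNat]])) := by
          simp [findLoop, hAguard, ha, hb, heq]
        have hm : mB cs last current = mB cs (last - 1) (current + 1) + 1 := by
          rw [hmB]; simp [heq]
        rw [hstepA]
        have hpol' : cs[last.toNat] :: (pol ++ [cs[current.toNat]])
            = PySem.List.slice cs (some (last - 1 + 1)) (some (current + 1)) := by
          rw [hpol]
          rw [PySem.List.slice_toNat cs (by omega : (0:Int) ≤ last - 1 + 1) (by omega : (0:Int) ≤ current + 1),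
              PySem.List.slice_toNat cs (by omega : (0:Int) ≤ last + 1) hcur0]
          have e1 : (last - 1 + 1).toNat = last.toNat := by omega
          have e2 : (current + 1).toNat = current.toNat + 1 := by omega
          rw [e1, e2, et]
          have hext := slice_extend cs last.toNat current.toNat (by omega) hcurlt
          simp only [List.take_drop] at hext ⊢
          exact hext.symm
        have hfuel' : (cs.length : Int) - (current + 1) < (fuel : Int) := by
          push_cast at hfuel; omega
        rw [ih (l + 1) (last - 1) (current + 1) (cs[last.toNat] :: (pol ++ [cs[current.toNat]]))
              (by omega) (by omega) (by omega) hpol' hfuel']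
        rw [hm,
            show l + 1 + mB cs (last - 1) (current + 1) = l + (mB cs (last - 1) (current + 1) + 1) from by ring,
            show last - 1 + 1 - mB cs (last - 1) (current + 1) = last + 1 - (mB cs (last - 1) (current + 1) + 1) from by ring,
            show current + 1 + mB cs (last - 1) (current + 1) = current + (mB cs (last - 1) (current + 1) + 1) from by ring]
      · -- mismatch: A stops, B counts zero
        have hA : findLoop cs (fuel + 1) l last current pol = (l, pol) := by
          simp [findLoop, hAguard, ha, hb, heq]
        have hm : mB cs last current = 0 := by rw [hmB]; simp [heq]
        rw [hA, hm, hpol]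
        norm_num
    · -- guard false: last = -1 (empty reversed prefix) or current = len (empty suffix); B counts zero
      have hA : findLoop cs (fuel + 1) l last current pol = (l, pol) := by
        have hng : ¬ (last ≠ -1 ∧ current ≠ (cs.length : Int)) := by omega
        simp [findLoop, hng]
      have hm : mB cs last current = 0 := by
        unfold mB
        rcases (by omega : last = -1 ∨ current = (cs.length : Int)) with h | h
        · rw [h]; simp [countMatch]
        · have : current.toNat = cs.length := by omega
          rw [this]
          simp [countMatch]
      rw [hA, hm, hpol]
      norm_num

-- ===== VERDICT (by name: the statement is the Claim_ definition above) =====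
theorem find_spec : Claim_equal_find := by
  intro s current _ hpre
  rcases hpre with ⟨h0, hlen⟩ | ⟨hlo, hhi, hne⟩
  · -- 0 ≤ current ≤ len: the loop lemma
    unfold Spec_find find find_alt
    have hinit : ([] : List Char) = PySem.List.slice s.toList (some (current - 1 + 1)) (some current) := by
      rw [show current - 1 + 1 = current from by omega, slice_self_nil]
    have h := loop_eq s.toList (s.toList.length + 1) 0 (current - 1) current []
      (by omega) (by omega) hlen hinit (by push_cast; omega)
    rw [show current - 1 + 1 = current from by omega] at h
    have hslB : PySem.List.slice s.toList none (some current) = s.toList.take current.toNat :=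
      PySem.List.slice_to s.toList h0
    have hsrB : PySem.List.slice s.toList (some current) none = s.toList.drop current.toNat :=
      PySem.List.slice_from s.toList h0
    have hm : mB s.toList (current - 1) current =
        countMatch (List.zip (s.toList.take current.toNat).reverse (s.toList.drop current.toNat)) := by
      unfold mB
      rw [show current - 1 + 1 = current from by omega]
    simp only [hslB, hsrB, ← hm, h, zero_add]
  · -- negative in-range current with mismatching first pair: A returns (0, ''), B counts zero
    unfold Spec_find find find_alt
    set n := s.toList.length with hn
    have hlen1 : 1 ≤ n := by omega
    set k : Nat := (-current).toNat with hk
    have hck : current = -(k : Int) := by omega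
    have hk1 : 0 < k := by omega
    have hkn : k < n := by omega
    -- A's side: first access mismatches, loop returns (0, [])
    obtain ⟨a, ha⟩ : ∃ a, PySem.List.pyGet? s.toList (current - 1) = some a := by
      rcases h : PySem.List.pyGet? s.toList (current - 1) with _ | a
      · rw [PySem.List.pyGet?_eq_none_iff] at h
        exact absurd (by unfold PySem.Raise.InRange; omega) h
      · exact ⟨a, rfl⟩
    obtain ⟨b, hb⟩ : ∃ b, PySem.List.pyGet? s.toList current = some b := by
      rcases h : PySem.List.pyGet? s.toList current with _ | b
      · rw [PySem.List.pyGet?_eq_none_iff] at h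
        exact absurd (by unfold PySem.Raise.InRange; omega) h
      · exact ⟨b, rfl⟩
    have hab : a ≠ b := by
      intro h; apply hne; rw [ha, hb, h]
    have hAg : current - 1 ≠ -1 ∧ current ≠ (n : Int) := ⟨by omega, by omega⟩
    have hA : findLoop s.toList (n + 1) 0 (current - 1) current [] = (0, []) := by
      simp [findLoop, hAg, ha, hb, hab, ← hn]
    -- B's side: identify the first pair of the zip with (s[current-1], s[current])
    have hj : n - k < n := by omega
    have hj1 : n - k - 1 < n := by omega
    have hsl : PySem.List.slice s.toList none (some current) = s.toList.take (n - k) := by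
      rw [hck]; exact PySem.List.slice_to_neg_natCast s.toList k hk1
    have hsr : PySem.List.slice s.toList (some current) none = s.toList.drop (n - k) := by
      rw [hck]; exact PySem.List.slice_from_neg_natCast s.toList k hk1
    have hga : a = s.toList[n - k - 1] := by
      have : PySem.List.pyGet? s.toList (current - 1) = some s.toList[n - k - 1] := by
        have h1 : current - 1 = -((k + 1 : Nat) : Int) := by push_cast; omega
        rw [h1, PySem.List.pyGet?_neg_natCast s.toList (k + 1) (by omega) (by omega)]
        rw [List.getElem?_eq_getElem (by omega)]
        have e : s.toList.length - (k + 1) = n - k - 1 := by omega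
        simp only [e]
      rw [ha] at this; exact Option.some.inj this
    have hgb : b = s.toList[n - k] := by
      have : PySem.List.pyGet? s.toList current = some s.toList[n - k] := by
        rw [hck, PySem.List.pyGet?_neg_natCast s.toList k hk1 (by omega)]
        rw [List.getElem?_eq_getElem (by omega)]
      rw [hb] at this; exact Option.some.inj this
    have hdec : (s.toList.take (n - k)).reverse = s.toList[n - k - 1] :: (s.toList.take (n - k - 1)).reverse := by
      have := take_succ_reverse s.toList (n - k - 1) hj1
      rw [show n - k - 1 + 1 = n - k from by omega] at this
      exact this
    have hdrop : s.toList.drop (n - k) = s.toList[n - k] :: s.toList.drop (n - k + 1) :=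
      List.drop_eq_getElem_cons hj
    have hcm : countMatch (List.zip (s.toList.take (n - k)).reverse (s.toList.drop (n - k))) = 0 := by
      rw [hdec, hdrop, List.zip_cons_cons]
      have hne' : s.toList[n - k - 1] ≠ s.toList[n - k] := by
        rw [← hga, ← hgb]; exact hab
      simp [countMatch, hne']
    simp only [hA, hsl, hsr, hcm, ← hn]
    rw [show current - 0 = current from by omega, show current + 0 = current from by omega, slice_self_nil]
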